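-- pv_equiv track=rewrite | github.com/galid1/Algorithm | python/3.exams/21.05.08(kakao-intern)/4.py | make_map
-- ===== SOURCE A (Python) =====
-- def make_map(n, roads):
--          #정방향, 반대
--     g = {i:[[0 for _ in range(n+1)],[0 for _ in range(n+1)]] for i in range(n+1)}
--     for p, q, s in roads:
--         if g[p][0][q] == 0:
--             g[p][0][q] = s
--             g[q][1][p] = s
--         else:
--             g[p][0][q] = min(g[p][0][q], s)
--             g[q][1][p] = min(g[q][1][p], s)
--
--     return g
-- ===== SOURCE B (Python) =====
-- def make_map(n, roads):
--     # B: collect-then-reduce. First pass only RECORDS each road's weight in a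
--     # per-cell sequence table W (no comparison logic at all); afterwards every
--     # output cell is reduced independently by folding the 0-sentinel/min rule
--     # over its own recorded weight sequence.
--     W = [[[] for _ in range(n + 1)] for _ in range(n + 1)]
--     for p, q, s in roads:
--         W[p][q].append(s)
--
--     def cell(ws):
--         v = 0
--         for s in ws:
--             v = s if v == 0 else min(v, s)
--         return v
--
--     return {i: [[cell(W[i][j]) for j in range(n + 1)],
--                 [cell(W[j][i]) for j in range(n + 1)]]
--             for i in range(n + 1)}
-- ===== Notes on version B (the rewrite author's own statement) =====
-- stated objective: alternative
-- what changed: A interleaves comparison and mutation: one pass over roads that min-updates both the forward and the reverse dense arrays in place; B is collect-then-reduce: its edge pass does no comparisons at all, only recording each cell's weight sequence in a table, and afterwards every output cell (forward and reverse) is computed independently by folding the 0-sentinel/min rule over that cell's own sequence.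
import Mathlib
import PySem

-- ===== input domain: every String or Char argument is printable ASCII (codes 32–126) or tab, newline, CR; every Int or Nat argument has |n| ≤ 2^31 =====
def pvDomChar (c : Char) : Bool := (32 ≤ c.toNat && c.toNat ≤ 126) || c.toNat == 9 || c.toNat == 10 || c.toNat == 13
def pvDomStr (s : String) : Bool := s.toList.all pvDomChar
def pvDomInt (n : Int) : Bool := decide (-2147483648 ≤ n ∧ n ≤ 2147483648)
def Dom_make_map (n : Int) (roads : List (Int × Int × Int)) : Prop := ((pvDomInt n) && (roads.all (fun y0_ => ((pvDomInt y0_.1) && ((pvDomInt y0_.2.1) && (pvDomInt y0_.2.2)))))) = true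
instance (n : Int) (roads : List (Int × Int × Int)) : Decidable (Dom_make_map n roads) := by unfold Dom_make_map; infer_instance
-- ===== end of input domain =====

-- B replaces A's interleaved in-place min-update loop by collect-then-reduce: the edge pass
-- only records each cell's weight sequence; every output cell is then reduced independently.

-- ===== PORT A =====
-- one iteration of A's `for p, q, s in roads` body (Python's in-place nested-list mutation
-- becomes re-inserting the updated row value under the same key, which preserves dict order)
def pvStepA (g : PySem.Dict Int (List (List Int))) (r : Int × Int × Int) : PySem.Dict Int (List (List Int)) :=
  let p := r.1; let q := r.2.1; let s := r.2.2
  let rowp := g.getD p []                                  -- g[p]       (KeyError excluded by Pre_)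
  let fwd := PySem.List.pyGetD rowp 0 []                   -- g[p][0]
  let cur := PySem.List.pyGetD fwd q 0                     -- g[p][0][q] (IndexError excluded by Pre_)
  if cur == 0 then
    let g1 := g.insert p (PySem.List.pySetD rowp 0 (PySem.List.pySetD fwd q s))     -- g[p][0][q] = s
    let rowq := g1.getD q []
    let rev := PySem.List.pyGetD rowq 1 []
    g1.insert q (PySem.List.pySetD rowq 1 (PySem.List.pySetD rev p s))              -- g[q][1][p] = s
  else
    let g1 := g.insert p (PySem.List.pySetD rowp 0 (PySem.List.pySetD fwd q (min cur s)))  -- g[p][0][q] = min(g[p][0][q], s)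
    let rowq := g1.getD q []
    let rev := PySem.List.pyGetD rowq 1 []
    g1.insert q (PySem.List.pySetD rowq 1 (PySem.List.pySetD rev p (min (PySem.List.pyGetD rev p 0) s)))  -- g[q][1][p] = min(g[q][1][p], s)

def make_map (n : Int) (roads : List (Int × Int × Int)) : List (Int × List (List Int)) :=
  let keys := PySem.List.pyRange 0 (n+1) 1
  let g0 : PySem.Dict Int (List (List Int)) :=   -- the dict comprehension: fresh zero rows per key
    keys.foldl (fun d i => d.insert i [keys.map (fun _ => (0:Int)), keys.map (fun _ => (0:Int))]) PySem.Dict.empty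
  (roads.foldl pvStepA g0).items

-- ===== PORT B =====
-- `W[p][q].append(s)`: in-place append inside the nested list becomes reading row and
-- cell (pyGetD) and writing the extended cell back (pySetD), Python index semantics
def pvCollect (T : List (List (List Int))) (r : Int × Int × Int) : List (List (List Int)) :=
  PySem.List.pySetD T r.1
    (PySem.List.pySetD (PySem.List.pyGetD T r.1 []) r.2.1
      ((PySem.List.pyGetD (PySem.List.pyGetD T r.1 []) r.2.1 []) ++ [r.2.2]))

-- B's `cell(ws)`: fold the 0-sentinel/min rule over one cell's recorded weight sequence
def pvCellB (ws : List Int) : Int := ws.foldl (fun v s => if v == 0 then s else min v s) 0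

def make_map_alt (n : Int) (roads : List (Int × Int × Int)) : List (Int × List (List Int)) :=
  let rng := PySem.List.pyRange 0 (n+1) 1
  let T0 : List (List (List Int)) := rng.map (fun _ => rng.map (fun _ => ([] : List Int)))
  let T := roads.foldl pvCollect T0
  rng.map (fun i =>
    (i, [rng.map (fun j => pvCellB (PySem.List.pyGetD (PySem.List.pyGetD T i []) j [])),
         rng.map (fun j => pvCellB (PySem.List.pyGetD (PySem.List.pyGetD T j []) i []))]))

-- ===== PRECONDITION & SPEC =====
-- Pre_ excludes exactly the inputs where A raises: some road endpoint outside 0..n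
-- (KeyError on a missing dict key, IndexError on a too-large column index).
def Pre_make_map (n : Int) (roads : List (Int × Int × Int)) : Prop :=
  ∀ r ∈ roads, 0 ≤ r.1 ∧ r.1 ≤ n ∧ 0 ≤ r.2.1 ∧ r.2.1 ≤ n
instance (n : Int) (roads : List (Int × Int × Int)) : Decidable (Pre_make_map n roads) := by unfold Pre_make_map; infer_instance
def pvWitness_make_map : Int × (List (Int × Int × Int)) := (2, [(0, 1, 5), (0, 1, 3), (2, 0, 0), (2, 0, 7)])

def Spec_make_map (n : Int) (roads : List (Int × Int × Int)) (out : List (Int × List (List Int))) : Prop := out = make_map_alt n roads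
instance (n : Int) (roads : List (Int × Int × Int)) (out : List (Int × List (List Int))) : Decidable (Spec_make_map n roads out) := by unfold Spec_make_map; infer_instance

-- ===== CLAIM (what is proved, stated in full; the proofs are below) =====
def Claim_equal_make_map : Prop := ∀ (n : Int) (roads : List (Int × Int × Int)), Dom_make_map n roads → Pre_make_map n roads → Spec_make_map n roads (make_map n roads)

-- ===== LEMMAS AND PROOFS =====
-- Plan: characterise A's loop as a pointwise cell update pvUpd of a single cell function W
-- (the dict is always the dense picture pvG of W, forward row i = W i ·, reverse = W · i);
-- then show each final cell W i j is the fold of the sentinel/min rule over exactly the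
-- weights of the roads with endpoints (i, j) — which is what B's grouped index delivers.

def pvRng (n : Int) : List Int := PySem.List.pyRange 0 (n+1) 1

-- the dense matrix dict generated by a cell function W
def pvG (n : Int) (W : Int → Int → Int) : PySem.Dict Int (List (List Int)) :=
  PySem.Dict.mk ((pvRng n).map (fun i => (i, [(pvRng n).map (fun j => W i j), (pvRng n).map (fun j => W j i)])))

-- the cell update one road performs
def pvUpd (W : Int → Int → Int) (r : Int × Int × Int) : Int → Int → Int :=
  fun i j => if i = r.1 ∧ j = r.2.1
    then (if W r.1 r.2.1 = 0 then r.2.2 else min (W r.1 r.2.1) r.2.2)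
    else W i j

lemma pvG_keys (n : Int) (W : Int → Int → Int) : (pvG n W).keys = pvRng n := by
  simp [pvG, PySem.Dict.keys, List.map_map, Function.comp_def]

lemma pvG_keys_nodup (n : Int) (W : Int → Int → Int) : (pvG n W).keys.Nodup := by
  rw [pvG_keys]; exact PySem.List.nodup_pyRange_one 0 (n+1)

lemma pvG_getD (n : Int) (W : Int → Int → Int) (p : Int) (h0 : 0 ≤ p) (h1 : p ≤ n) :
    (pvG n W).getD p [] = [(pvRng n).map (fun j => W p j), (pvRng n).map (fun j => W j p)] := by
  have hmem : (p, [(pvRng n).map (fun j => W p j), (pvRng n).map (fun j => W j p)]) ∈ (pvG n W).items :=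
    List.mem_map.mpr ⟨p, by rw [pvRng, PySem.List.mem_pyRange_one]; omega, rfl⟩
  exact PySem.Dict.getD_of_mem_items _ hmem (pvG_keys_nodup n W) []

lemma pvSetRow {α : Type} (n : Int) (f : Int → α) (k : Int) (v : α) (h0 : 0 ≤ k) (h1 : k ≤ n) :
    PySem.List.pySetD ((pvRng n).map f) k v = (pvRng n).map (fun j => if j = k then v else f j) := by
  rw [PySem.List.pySetD_of_nonneg _ _ h0]
  apply List.ext_getElem
  · simp
  · intro m hm1 hm2
    have hm : m < (pvRng n).length := by simpa using hm2
    simp only [List.getElem_set, List.getElem_map]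
    have hr : (pvRng n)[m] = (0:Int) + m :=
      PySem.List.getElem_pyRange_one 0 (n+1) m (by simpa [pvRng] using hm)
    by_cases hc : k.toNat = m
    · rw [if_pos hc, if_pos (by rw [hr]; omega)]
    · rw [if_neg hc, if_neg (by rw [hr]; omega)]

lemma pvRowGet {α : Type} (n : Int) (f : Int → α) (q : Int) (d : α) (h0 : 0 ≤ q) (h1 : q ≤ n) :
    PySem.List.pyGetD ((pvRng n).map f) q d = f q := by
  simpa [pvRng] using PySem.List.pyGetD_map_pyRange_of_nonneg f (n+1) q d h0 (by omega)

lemma pvSet0 {α : Type} (a : α) (l : List α) (x : α) :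
    PySem.List.pySetD (a :: l) 0 x = x :: l := by
  rw [PySem.List.pySetD_of_nonneg _ _ (by norm_num)]; rfl

lemma pvSet1 {α : Type} (a b : α) (l : List α) (x : α) :
    PySem.List.pySetD (a :: b :: l) 1 x = a :: x :: l := by
  rw [PySem.List.pySetD_of_nonneg _ _ (by norm_num)]; rfl

lemma pvGet1 {α : Type} (a b : α) (l : List α) (d : α) :
    PySem.List.pyGetD (a :: b :: l) 1 d = b := by
  have h1 : ((1:Nat):Int) = 1 := by norm_num
  rw [← h1, PySem.List.pyGetD_natCast]; rfl

lemma pvDoubleInsert (n : Int) (f : Int → List (List Int)) (p q : Int) (vp vq : List (List Int))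
    (hp0 : 0 ≤ p) (hp1 : p ≤ n) (hq0 : 0 ≤ q) (hq1 : q ≤ n) :
    ((PySem.Dict.mk ((pvRng n).map (fun i => (i, f i)))).insert p vp).insert q vq
      = PySem.Dict.mk ((pvRng n).map (fun i => (i, if i = q then vq else if i = p then vp else f i))) := by
  have hmemp : p ∈ (pvRng n) := by rw [pvRng, PySem.List.mem_pyRange_one]; omega
  have hmemq : q ∈ (pvRng n) := by rw [pvRng, PySem.List.mem_pyRange_one]; omega
  have hkeys : (PySem.Dict.mk ((pvRng n).map (fun i => (i, f i)))).keys = pvRng n := by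
    simp [PySem.Dict.keys, List.map_map, Function.comp_def]
  have hc1 : (PySem.Dict.mk ((pvRng n).map (fun i => (i, f i)))).contains p := by
    rw [PySem.Dict.contains_iff_mem_keys, hkeys]; exact hmemp
  have hc2 : ((PySem.Dict.mk ((pvRng n).map (fun i => (i, f i)))).insert p vp).contains q := by
    rw [PySem.Dict.contains_insert]
    simp only [Bool.or_eq_true]
    right
    rw [PySem.Dict.contains_iff_mem_keys, hkeys]; exact hmemq
  apply PySem.Dict.ext
  rw [PySem.Dict.items_insert_of_contains _ _ hc2,
      PySem.Dict.items_insert_of_contains _ _ hc1]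
  show ((List.map _ _).map _).map _ = _
  rw [List.map_map, List.map_map]
  apply List.map_congr_left
  intro i _
  by_cases hiq : i = q <;> by_cases hip : i = p <;> by_cases hqp : q = p <;>
    subst_vars <;> simp_all

lemma pvG_insert2 (n : Int) (W : Int → Int → Int) (p q : Int) (vp vq : List (List Int))
    (hp0 : 0 ≤ p) (hp1 : p ≤ n) (hq0 : 0 ≤ q) (hq1 : q ≤ n) :
    ((pvG n W).insert p vp).insert q vq
      = PySem.Dict.mk ((pvRng n).map (fun i => (i, if i = q then vq else if i = p then vp
          else [(pvRng n).map (fun j => W i j), (pvRng n).map (fun j => W j i)]))) :=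
  pvDoubleInsert n (fun i => [(pvRng n).map (fun j => W i j), (pvRng n).map (fun j => W j i)])
    p q vp vq hp0 hp1 hq0 hq1

lemma pvStepA_G (n : Int) (W : Int → Int → Int) (r : Int × Int × Int)
    (hp0 : 0 ≤ r.1) (hp1 : r.1 ≤ n) (hq0 : 0 ≤ r.2.1) (hq1 : r.2.1 ≤ n) :
    pvStepA (pvG n W) r = pvG n (pvUpd W r) := by
  obtain ⟨p, q, s⟩ := r
  simp only at hp0 hp1 hq0 hq1
  have hv1 : PySem.List.pyGetD ((pvRng n).map (fun j => W p j)) q 0 = W p q :=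
    pvRowGet n _ q 0 hq0 hq1
  simp only [pvStepA]
  rw [pvG_getD n W p hp0 hp1]
  simp only [PySem.List.pyGetD_zero_cons, hv1]
  by_cases hz : W p q = 0
  · rw [if_pos (by simp [hz])]
    rw [pvSetRow n (fun j => W p j) q s hq0 hq1, pvSet0]
    rw [PySem.Dict.getD_insert]
    by_cases hqp : q = p
    · rw [if_pos hqp]
      subst hqp
      rw [pvGet1, pvSetRow n (fun j => W j q) q s hq0 hq1, pvSet1]
      rw [pvG_insert2 n W q q _ _ hq0 hq1 hq0 hq1]
      apply PySem.Dict.ext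
      apply List.map_congr_left
      intro i _
      by_cases hiq : i = q <;>
        simp [hiq, pvUpd, hz] <;>
        (try constructor) <;> (try intro j _) <;> (try split_ifs) <;> simp_all <;> try omega
    · rw [if_neg hqp]
      rw [pvG_getD n W q hq0 hq1, pvGet1,
          pvSetRow n (fun j => W j q) p s hp0 hp1, pvSet1]
      rw [pvG_insert2 n W p q _ _ hp0 hp1 hq0 hq1]
      apply PySem.Dict.ext
      apply List.map_congr_left
      intro i _
      by_cases hiq : i = q <;> by_cases hip : i = p <;>
        simp [hiq, hip, hqp, Ne.symm hqp, pvUpd, hz] <;>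
        (try constructor) <;> (try intro j _) <;> (try split_ifs) <;> simp_all <;> try omega
  · rw [if_neg (by simp [hz])]
    rw [pvSetRow n (fun j => W p j) q (min (W p q) s) hq0 hq1, pvSet0]
    rw [PySem.Dict.getD_insert]
    by_cases hqp : q = p
    · rw [if_pos hqp]
      subst hqp
      rw [pvGet1]
      rw [pvRowGet n (fun j => W j q) q 0 hq0 hq1]
      rw [pvSetRow n (fun j => W j q) q (min (W q q) s) hq0 hq1, pvSet1]
      rw [pvG_insert2 n W q q _ _ hq0 hq1 hq0 hq1]
      apply PySem.Dict.ext
      apply List.map_congr_left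
      intro i _
      by_cases hiq : i = q <;>
        simp [hiq, pvUpd, hz] <;>
        (try constructor) <;> (try intro j _) <;> (try split_ifs) <;> simp_all <;> try omega
    · rw [if_neg hqp]
      rw [pvG_getD n W q hq0 hq1, pvGet1]
      rw [pvRowGet n (fun j => W j q) p 0 hp0 hp1]
      rw [pvSetRow n (fun j => W j q) p (min (W p q) s) hp0 hp1, pvSet1]
      rw [pvG_insert2 n W p q _ _ hp0 hp1 hq0 hq1]
      apply PySem.Dict.ext
      apply List.map_congr_left
      intro i _
      by_cases hiq : i = q <;> by_cases hip : i = p <;>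
        simp [hiq, hip, hqp, Ne.symm hqp, pvUpd, hz] <;>
        (try constructor) <;> (try intro j _) <;> (try split_ifs) <;> simp_all <;> try omega

lemma pvFoldA (n : Int) (roads : List (Int × Int × Int)) (W : Int → Int → Int)
    (h : ∀ r ∈ roads, 0 ≤ r.1 ∧ r.1 ≤ n ∧ 0 ≤ r.2.1 ∧ r.2.1 ≤ n) :
    roads.foldl pvStepA (pvG n W) = pvG n (roads.foldl pvUpd W) := by
  induction roads generalizing W with
  | nil => rfl
  | cons r rs ih =>
    have hr := h r (by simp)
    simp only [List.foldl_cons]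
    rw [pvStepA_G n W r hr.1 hr.2.1 hr.2.2.1 hr.2.2.2]
    exact ih _ (fun x hx => h x (by simp [hx]))

lemma pvG0 (n : Int) :
    (pvRng n).foldl (fun d i => d.insert i [(pvRng n).map (fun _ => (0:Int)), (pvRng n).map (fun _ => (0:Int))]) PySem.Dict.empty
      = pvG n (fun _ _ => 0) := by
  apply PySem.Dict.ext
  rw [PySem.Dict.items_foldl_insert_fresh (pvRng n) (fun a => a)
      (fun _ => [(pvRng n).map (fun _ => (0:Int)), (pvRng n).map (fun _ => (0:Int))])
      PySem.Dict.empty (by intro a _; rfl) (by simpa using PySem.List.nodup_pyRange_one 0 (n+1))]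
  rfl

-- === B-side characterisation ===

-- the cell update, one-value form (B's inner reduction body)
def pvStep (v s : Int) : Int := if v == 0 then s else min v s

-- A's folded cell value is the fold of pvStep over exactly this cell's weights
lemma pvCellFold (roads : List (Int × Int × Int)) (W : Int → Int → Int) (i j : Int) :
    (roads.foldl pvUpd W) i j
      = ((roads.filter (fun r => decide ((r.1, r.2.1) = (i, j)))).map (fun r => r.2.2)).foldl pvStep (W i j) := by
  induction roads generalizing W with
  | nil => rfl
  | cons r rs ih =>
    simp only [List.foldl_cons, List.filter_cons]
    by_cases hk : (r.1, r.2.1) = (i, j)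
    · have hij : i = r.1 ∧ j = r.2.1 := by
        obtain ⟨h1, h2⟩ := Prod.mk.injEq .. ▸ hk; exact ⟨h1.symm, h2.symm⟩
      rw [if_pos (by simp [hk])]
      rw [ih]
      simp only [List.map_cons, List.foldl_cons]
      congr 1
      simp [pvUpd, pvStep, hij.1, hij.2]
    · rw [if_neg (by simp [hk])]
      rw [ih]
      congr 1
      simp only [pvUpd]
      rw [if_neg (by rintro ⟨h1, h2⟩; exact hk (by simp [h1, h2]))]

-- the dense weight-sequence table generated by a cell function L (B's picture of the state)
def pvT (n : Int) (L : Int → Int → List Int) : List (List (List Int)) :=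
  (pvRng n).map (fun i => (pvRng n).map (fun j => L i j))

-- the table update one road performs
def pvLUpd (L : Int → Int → List Int) (r : Int × Int × Int) : Int → Int → List Int :=
  fun i j => if i = r.1 ∧ j = r.2.1 then L r.1 r.2.1 ++ [r.2.2] else L i j

lemma pvCollect_T (n : Int) (L : Int → Int → List Int) (r : Int × Int × Int)
    (hp0 : 0 ≤ r.1) (hp1 : r.1 ≤ n) (hq0 : 0 ≤ r.2.1) (hq1 : r.2.1 ≤ n) :
    pvCollect (pvT n L) r = pvT n (pvLUpd L r) := by
  obtain ⟨p, q, s⟩ := r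
  simp only at hp0 hp1 hq0 hq1
  simp only [pvCollect, pvT]
  rw [pvRowGet n _ p _ hp0 hp1, pvRowGet n _ q _ hq0 hq1,
      pvSetRow n _ q _ hq0 hq1, pvSetRow n _ p _ hp0 hp1]
  apply List.map_congr_left
  intro i _
  by_cases hip : i = p
  · rw [if_pos hip]
    apply List.map_congr_left
    intro j _
    by_cases hjq : j = q <;> simp [hjq, hip, pvLUpd]
  · rw [if_neg hip]
    apply List.map_congr_left
    intro j _
    simp only [pvLUpd]
    rw [if_neg (by rintro ⟨h1, h2⟩; exact hip h1)]

lemma pvFoldCollect (n : Int) (roads : List (Int × Int × Int)) (L : Int → Int → List Int)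
    (h : ∀ r ∈ roads, 0 ≤ r.1 ∧ r.1 ≤ n ∧ 0 ≤ r.2.1 ∧ r.2.1 ≤ n) :
    roads.foldl pvCollect (pvT n L) = pvT n (roads.foldl pvLUpd L) := by
  induction roads generalizing L with
  | nil => rfl
  | cons r rs ih =>
    have hr := h r (by simp)
    simp only [List.foldl_cons]
    rw [pvCollect_T n L r hr.1 hr.2.1 hr.2.2.1 hr.2.2.2]
    exact ih _ (fun x hx => h x (by simp [hx]))

-- the table accumulates, per cell, exactly the weights of that cell's roads
lemma pvLFold (roads : List (Int × Int × Int)) (L : Int → Int → List Int) (i j : Int) :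
    (roads.foldl pvLUpd L) i j
      = L i j ++ (roads.filter (fun r => decide ((r.1, r.2.1) = (i, j)))).map (fun r => r.2.2) := by
  induction roads generalizing L with
  | nil => simp
  | cons r rs ih =>
    simp only [List.foldl_cons, List.filter_cons]
    by_cases hk : (r.1, r.2.1) = (i, j)
    · have hij : i = r.1 ∧ j = r.2.1 := by
        obtain ⟨h1, h2⟩ := Prod.mk.injEq .. ▸ hk; exact ⟨h1.symm, h2.symm⟩
      rw [if_pos (by simp [hk]), ih]
      simp only [pvLUpd]
      rw [if_pos ⟨hij.1, hij.2⟩, hij.1, hij.2]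
      simp [List.append_assoc]
    · rw [if_neg (by simp [hk]), ih]
      simp only [pvLUpd]
      rw [if_neg (by rintro ⟨h1, h2⟩; exact hk (by simp [h1, h2]))]

-- B's per-cell reduction equals A's final cell value
lemma pvCellB_eq (roads : List (Int × Int × Int)) (i j : Int) :
    pvCellB ((roads.foldl pvLUpd (fun _ _ => [])) i j) = (roads.foldl pvUpd (fun _ _ => 0)) i j := by
  rw [pvCellFold, pvLFold]
  rfl

lemma pvMain (n : Int) (roads : List (Int × Int × Int))
    (h : ∀ r ∈ roads, 0 ≤ r.1 ∧ r.1 ≤ n ∧ 0 ≤ r.2.1 ∧ r.2.1 ≤ n) :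
    make_map n roads = make_map_alt n roads := by
  show (roads.foldl pvStepA _).items = _
  rw [show (PySem.List.pyRange 0 (n+1) 1) = pvRng n from rfl, pvG0 n, pvFoldA n roads _ h]
  show ((pvG n _).items)
      = (pvRng n).map (fun i =>
          (i, [(pvRng n).map (fun j => pvCellB (PySem.List.pyGetD (PySem.List.pyGetD (roads.foldl pvCollect ((pvRng n).map (fun _ => (pvRng n).map (fun _ => ([] : List Int))))) i []) j [])),
               (pvRng n).map (fun j => pvCellB (PySem.List.pyGetD (PySem.List.pyGetD (roads.foldl pvCollect ((pvRng n).map (fun _ => (pvRng n).map (fun _ => ([] : List Int))))) j []) i []))]))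
  rw [show ((pvRng n).map (fun _ => (pvRng n).map (fun _ => ([] : List Int)))) = pvT n (fun _ _ => []) from rfl,
      pvFoldCollect n roads _ h]
  apply List.map_congr_left
  intro i hi
  have hib : 0 ≤ i ∧ i ≤ n := by rw [pvRng, PySem.List.mem_pyRange_one] at hi; omega
  simp only [Prod.mk.injEq, List.cons.injEq]
  refine ⟨trivial, ?_, ?_, trivial⟩ <;>
  · apply List.map_congr_left
    intro j hj
    have hjb : 0 ≤ j ∧ j ≤ n := by rw [pvRng, PySem.List.mem_pyRange_one] at hj; omega
    first
    | rw [show pvT n (roads.foldl pvLUpd (fun _ _ => [])) = (pvRng n).map (fun a => (pvRng n).map (fun b => (roads.foldl pvLUpd (fun _ _ => [])) a b)) from rfl,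
          pvRowGet n _ i [] hib.1 hib.2, pvRowGet n _ j [] hjb.1 hjb.2, pvCellB_eq]
    | rw [show pvT n (roads.foldl pvLUpd (fun _ _ => [])) = (pvRng n).map (fun a => (pvRng n).map (fun b => (roads.foldl pvLUpd (fun _ _ => [])) a b)) from rfl,
          pvRowGet n _ j [] hjb.1 hjb.2, pvRowGet n _ i [] hib.1 hib.2, pvCellB_eq]

-- ===== VERDICT (by name: the statement is the Claim_ definition above) =====
theorem make_map_spec : Claim_equal_make_map := by
  intro n roads _ hpre
  unfold Spec_make_map
  exact pvMain n roads hpre
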